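-- pv_equiv track=rewrite | github.com/Vuong02011996/ai-engineer | Onnx_tensorRT/Onnx_runtime/full_predict_onnxruntime.py | beat_cluster
-- ===== SOURCE A (Python) =====
-- def beat_cluster(beats, symbols, amps, min_rr):
--     _beats = []
--     _symbols = []
--     _amps = []
--     _lens = []
--     if len(beats) > 0:
--         groups_beat = [beats[0]]
--         groups_syms = [symbols[0]]
--         groups_amps = [amps[0]]
--         for index in range(1, len(beats)):
--             if (beats[index] - groups_beat[-1]) > min_rr:
--                 _beats.append(groups_beat.copy())
--                 _symbols.append(groups_syms.copy())
--                 _amps.append(groups_amps.copy())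
--                 _lens.append(len(groups_beat))
--
--                 groups_beat.clear()
--                 groups_syms.clear()
--                 groups_amps.clear()
--
--             groups_beat.append(beats[index])
--             groups_syms.append(symbols[index])
--             groups_amps.append(amps[index])
--
--         if len(groups_beat) > 0:
--             _beats.append(groups_beat.copy())
--             _symbols.append(groups_syms.copy())
--             _amps.append(groups_amps.copy())
--             _lens.append(len(groups_beat))
--
--     return _beats, _symbols, _amps, _lens
-- ===== SOURCE B (Python) =====
-- def beat_cluster(beats, symbols, amps, min_rr):
--     n = len(beats)
--     if n == 0:
--         return [], [], [], []
--     # pass 1: boundary indices where the RR gap exceeds min_rr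
--     bounds = [0] + [i for i in range(1, n) if beats[i] - beats[i - 1] > min_rr] + [n]
--     segs = list(zip(bounds, bounds[1:]))
--     # pass 2: materialise each segment by slicing
--     _beats = [list(beats[s:e]) for s, e in segs]
--     _symbols = [list(symbols[s:e]) for s, e in segs]
--     _amps = [list(amps[s:e]) for s, e in segs]
--     _lens = [e - s for s, e in segs]
--     return _beats, _symbols, _amps, _lens
-- ===== Notes on version B (the rewrite author's own statement) =====
-- stated objective: alternative
-- what changed: Replaces A's single stateful loop that mutates rolling group buffers with two passes: first collect the boundary indices where the RR gap exceeds min_rr, then build every group, for all three lists and the lengths, by slicing between consecutive boundaries.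
import Mathlib
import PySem

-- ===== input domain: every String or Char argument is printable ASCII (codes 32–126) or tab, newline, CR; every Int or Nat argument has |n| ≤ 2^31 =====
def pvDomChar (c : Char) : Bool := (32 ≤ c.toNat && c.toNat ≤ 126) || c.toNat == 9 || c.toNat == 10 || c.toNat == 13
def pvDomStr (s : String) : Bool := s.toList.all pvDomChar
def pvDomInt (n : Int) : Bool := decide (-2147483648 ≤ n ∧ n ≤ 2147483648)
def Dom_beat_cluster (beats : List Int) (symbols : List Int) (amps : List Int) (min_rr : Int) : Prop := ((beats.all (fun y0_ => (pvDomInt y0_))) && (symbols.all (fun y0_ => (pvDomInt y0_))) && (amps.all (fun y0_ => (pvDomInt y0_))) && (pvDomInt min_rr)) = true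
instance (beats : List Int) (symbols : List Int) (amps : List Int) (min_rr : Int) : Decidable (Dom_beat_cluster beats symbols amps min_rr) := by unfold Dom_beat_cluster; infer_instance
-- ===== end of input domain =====

-- B replaces A's single stateful loop over mutable group buffers with a boundary-index pass followed by
-- slicing between consecutive boundaries (alternative decomposition, same O(n) cost).


-- ===== PORT A =====
-- the body of A's `for index in range(1, len(beats))` loop, acting on the 7-tuple of locals
-- (_beats, _symbols, _amps, _lens, groups_beat, groups_syms, groups_amps)
def pvStepA (beats : List Int) (symbols : List Int) (amps : List Int) (min_rr : Int)
    (st : List (List Int) × List (List Int) × List (List Int) × List Int × List Int × List Int × List Int)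
    (index : Int) : List (List Int) × List (List Int) × List (List Int) × List Int × List Int × List Int × List Int :=
  match st with
  | (bs, ss, aas, ls, gb, gs, ga) =>
    let (bs, ss, aas, ls, gb, gs, ga) :=
      if PySem.List.pyGetD beats index 0 - PySem.List.pyGetD gb (-1) 0 > min_rr then
        (bs ++ [gb], ss ++ [gs], aas ++ [ga], ls ++ [PySem.List.len gb],
         ([] : List Int), ([] : List Int), ([] : List Int))
      else (bs, ss, aas, ls, gb, gs, ga)
    (bs, ss, aas, ls,
     gb ++ [PySem.List.pyGetD beats index 0],
     gs ++ [PySem.List.pyGetD symbols index 0],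
     ga ++ [PySem.List.pyGetD amps index 0])

def beat_cluster (beats : List Int) (symbols : List Int) (amps : List Int) (min_rr : Int) : List (List Int) × List (List Int) × List (List Int) × List Int :=
  if 0 < PySem.List.len beats then
    match (PySem.List.pyRange 1 (PySem.List.len beats) 1).foldl (pvStepA beats symbols amps min_rr)
        ([], [], [], [],
         [PySem.List.pyGetD beats 0 0], [PySem.List.pyGetD symbols 0 0], [PySem.List.pyGetD amps 0 0]) with
    | (bs, ss, aas, ls, gb, gs, ga) =>
      if 0 < PySem.List.len gb then
        (bs ++ [gb], ss ++ [gs], aas ++ [ga], ls ++ [PySem.List.len gb])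
      else (bs, ss, aas, ls)
  else ([], [], [], [])

-- ===== PORT B =====
-- `[i for i in range(1, k) if beats[i] - beats[i-1] > min_rr]`
def pvCuts (beats : List Int) (min_rr : Int) (k : Int) : List Int :=
  (PySem.List.pyRange 1 k 1).filter
    (fun i => decide (PySem.List.pyGetD beats i 0 - PySem.List.pyGetD beats (i - 1) 0 > min_rr))

-- `list(zip(bounds, bounds[1:]))`
def pvSegs (l : List Int) : List (Int × Int) := l.zip l.tail

def beat_cluster_alt (beats : List Int) (symbols : List Int) (amps : List Int) (min_rr : Int) : List (List Int) × List (List Int) × List (List Int) × List Int :=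
  let n := PySem.List.len beats
  if n = 0 then ([], [], [], [])
  else
    let segs := pvSegs ((0 :: pvCuts beats min_rr n) ++ [n])
    (segs.map (fun se => PySem.List.slice beats (some se.1) (some se.2)),
     segs.map (fun se => PySem.List.slice symbols (some se.1) (some se.2)),
     segs.map (fun se => PySem.List.slice amps (some se.1) (some se.2)),
     segs.map (fun se => se.2 - se.1))

-- ===== PRECONDITION & SPEC =====
-- Pre_ excludes exactly the inputs where A raises IndexError: symbols or amps shorter than beats
-- (A reads symbols[i] and amps[i] for every i < len(beats)).
def Pre_beat_cluster (beats : List Int) (symbols : List Int) (amps : List Int) (min_rr : Int) : Prop :=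
  beats.length ≤ symbols.length ∧ beats.length ≤ amps.length
instance (beats : List Int) (symbols : List Int) (amps : List Int) (min_rr : Int) : Decidable (Pre_beat_cluster beats symbols amps min_rr) := by unfold Pre_beat_cluster; infer_instance

def pvWitness_beat_cluster : List Int × List Int × List Int × Int := ([0, 5, 6], [1, 2, 3], [7, 8, 9], 2)

def Spec_beat_cluster (beats : List Int) (symbols : List Int) (amps : List Int) (min_rr : Int) (out : List (List Int) × List (List Int) × List (List Int) × List Int) : Prop := out = beat_cluster_alt beats symbols amps min_rr
instance (beats : List Int) (symbols : List Int) (amps : List Int) (min_rr : Int) (out : List (List Int) × List (List Int) × List (List Int) × List Int) : Decidable (Spec_beat_cluster beats symbols amps min_rr out) := by unfold Spec_beat_cluster; infer_instance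

-- ===== CLAIM (what is proved, stated in full; the proofs are below) =====
def Claim_equal_beat_cluster : Prop := ∀ (beats : List Int) (symbols : List Int) (amps : List Int) (min_rr : Int), Dom_beat_cluster beats symbols amps min_rr → Pre_beat_cluster beats symbols amps min_rr → Spec_beat_cluster beats symbols amps min_rr (beat_cluster beats symbols amps min_rr)

-- ===== LEMMAS AND PROOFS =====

-- the last boundary opened so far (0, or the last cut index below k)
def pvLast (beats : List Int) (min_rr : Int) (k : Int) : Int :=
  ((0 :: pvCuts beats min_rr k).getLast?).getD 0

lemma pvLast_eq_getLast (beats : List Int) (min_rr : Int) (k : Int) :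
    pvLast beats min_rr k = (0 :: pvCuts beats min_rr k).getLast (by simp) := by
  unfold pvLast
  rw [List.getLast?_eq_some_getLast (l := 0 :: pvCuts beats min_rr k) (by simp)]
  rfl

lemma pvSegs_append_singleton (l : List Int) (x : Int) (h : l ≠ []) :
    pvSegs (l ++ [x]) = pvSegs l ++ [(l.getLast h, x)] := by
  induction l with
  | nil => simp at h
  | cons a t ih =>
    cases t with
    | nil => simp [pvSegs]
    | cons b u =>
      have := ih (by simp)
      simp [pvSegs] at this ⊢
      simpa [pvSegs] using this

lemma pvCuts_succ (beats : List Int) (min_rr : Int) (k : Int) (hk : 1 ≤ k) :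
    pvCuts beats min_rr (k + 1) = pvCuts beats min_rr k ++
      (if PySem.List.pyGetD beats k 0 - PySem.List.pyGetD beats (k - 1) 0 > min_rr then [k] else []) := by
  unfold pvCuts
  rw [PySem.List.pyRange_one_succ_right hk, List.filter_append]
  by_cases h : PySem.List.pyGetD beats k 0 - PySem.List.pyGetD beats (k - 1) 0 > min_rr <;>
    simp [h]

lemma pvCuts_mem (beats : List Int) (min_rr : Int) (k x : Int)
    (hx : x ∈ pvCuts beats min_rr k) : 1 ≤ x ∧ x < k := by
  unfold pvCuts at hx
  have := List.mem_filter.mp hx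
  exact (PySem.List.mem_pyRange_one).mp this.1

lemma pvLast_bounds (beats : List Int) (min_rr : Int) (k : Int) (hk : 1 ≤ k) :
    0 ≤ pvLast beats min_rr k ∧ pvLast beats min_rr k < k := by
  rw [pvLast_eq_getLast]
  have hmem := List.getLast_mem (l := 0 :: pvCuts beats min_rr k) (by simp)
  rcases List.mem_cons.mp hmem with h | h
  · rw [← h] at hmem ⊢
    rw [h]
    omega
  · have := pvCuts_mem beats min_rr k _ h
    omega

lemma slice_len_int (xs : List Int) (s k : Int) (h0 : 0 ≤ s) (h1 : s ≤ k) (h2 : k ≤ (xs.length : Int)) :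
    PySem.List.len (PySem.List.slice xs (some s) (some k)) = k - s := by
  rw [PySem.List.slice_toNat _ h0 (by omega)]
  simp [PySem.List.len_eq]
  omega

lemma slice_snoc (xs : List Int) (s k : Int) (h0 : 0 ≤ s) (h1 : s ≤ k) (h2 : k < (xs.length : Int)) :
    PySem.List.slice xs (some s) (some k) ++ [PySem.List.pyGetD xs k 0]
      = PySem.List.slice xs (some s) (some (k + 1)) := by
  rw [PySem.List.slice_toNat _ h0 (by omega), PySem.List.slice_toNat _ h0 (by omega)]
  have hk : (k + 1).toNat - s.toNat = (k.toNat - s.toNat) + 1 := by omega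
  rw [hk, List.take_add_one]
  rw [PySem.List.pyGetD_eq_getElem xs 0 (by omega) (by omega)]
  congr 1
  rw [List.getElem?_drop]
  rw [show s.toNat + (k.toNat - s.toNat) = k.toNat from by omega]
  rw [List.getElem?_eq_getElem (by omega)]
  rfl

lemma slice_singleton (xs : List Int) (k : Int) (h0 : 0 ≤ k) (h2 : k < (xs.length : Int)) :
    PySem.List.slice xs (some k) (some (k + 1)) = [PySem.List.pyGetD xs k 0] := by
  have h := slice_snoc xs k k h0 le_rfl h2
  rw [PySem.List.slice_toNat _ h0 h0] at h
  simpa using h.symm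

lemma slice_last (xs : List Int) (s k : Int) (h0 : 0 ≤ s) (h1 : s < k) (h2 : k ≤ (xs.length : Int)) :
    PySem.List.pyGetD (PySem.List.slice xs (some s) (some k)) (-1) 0
      = PySem.List.pyGetD xs (k - 1) 0 := by
  have h := slice_snoc xs s (k - 1) h0 (by omega) (by omega)
  rw [show k - 1 + 1 = k from by omega] at h
  rw [← h, PySem.List.pyGetD_neg_one_append_singleton]

lemma pv_inv (beats symbols amps : List Int) (min_rr : Int)
    (hs : beats.length ≤ symbols.length) (ha : beats.length ≤ amps.length)
    (m : Nat) (hm : (m : Int) + 1 ≤ (beats.length : Int)) :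
    (PySem.List.pyRange 1 ((m : Int) + 1) 1).foldl (pvStepA beats symbols amps min_rr)
      ([], [], [], [],
       [PySem.List.pyGetD beats 0 0], [PySem.List.pyGetD symbols 0 0], [PySem.List.pyGetD amps 0 0])
    = ((pvSegs (0 :: pvCuts beats min_rr ((m : Int) + 1))).map (fun se => PySem.List.slice beats (some se.1) (some se.2)),
       (pvSegs (0 :: pvCuts beats min_rr ((m : Int) + 1))).map (fun se => PySem.List.slice symbols (some se.1) (some se.2)),
       (pvSegs (0 :: pvCuts beats min_rr ((m : Int) + 1))).map (fun se => PySem.List.slice amps (some se.1) (some se.2)),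
       (pvSegs (0 :: pvCuts beats min_rr ((m : Int) + 1))).map (fun se => se.2 - se.1),
       PySem.List.slice beats (some (pvLast beats min_rr ((m : Int) + 1))) (some ((m : Int) + 1)),
       PySem.List.slice symbols (some (pvLast beats min_rr ((m : Int) + 1))) (some ((m : Int) + 1)),
       PySem.List.slice amps (some (pvLast beats min_rr ((m : Int) + 1))) (some ((m : Int) + 1))) := by
  have hs' : (beats.length : Int) ≤ (symbols.length : Int) := by exact_mod_cast hs
  have ha' : (beats.length : Int) ≤ (amps.length : Int) := by exact_mod_cast ha
  induction m with
  | zero =>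
    have hc : pvCuts beats min_rr ((0:Nat) + 1) = [] := by
      unfold pvCuts
      rw [show ((0:Nat):Int) + 1 = 1 from by norm_num, PySem.List.pyRange_one_eq_nil le_rfl]
      rfl
    have hl : pvLast beats min_rr (((0:Nat):Int) + 1) = 0 := by
      unfold pvLast
      rw [hc]
      rfl
    rw [show ((0:Nat):Int) + 1 = 1 from by norm_num] at hc hl hm ⊢
    rw [PySem.List.pyRange_one_eq_nil le_rfl, hc, hl]
    simp only [List.foldl_nil, pvSegs]  -- segs [0] = []
    rw [show (1:Int) = 0 + 1 from by norm_num]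
    rw [slice_singleton beats 0 le_rfl (by omega),
        slice_singleton symbols 0 le_rfl (by omega),
        slice_singleton amps 0 le_rfl (by omega)]
    simp
  | succ m ih =>
    rw [show (((m+1:Nat)):Int) = (m:Int) + 1 from by push_cast; ring] at hm ⊢
    have hk1 : (1:Int) ≤ (m:Int) + 1 := by omega
    rw [PySem.List.pyRange_one_succ_right hk1, List.foldl_append, ih (by omega)]
    have hlb := pvLast_bounds beats min_rr ((m:Int)+1) hk1
    have hkb : (m:Int) + 1 < (beats.length : Int) := by omega
    simp only [List.foldl_cons, List.foldl_nil, pvStepA]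
    rw [slice_last beats (pvLast beats min_rr ((m:Int)+1)) ((m:Int)+1) hlb.1 hlb.2 (by omega)]
    by_cases hC : PySem.List.pyGetD beats ((m:Int)+1) 0 - PySem.List.pyGetD beats ((m:Int)+1 - 1) 0 > min_rr
    · rw [if_pos hC]
      have hcuts := pvCuts_succ beats min_rr ((m:Int)+1) hk1
      rw [if_pos hC] at hcuts
      have hlast : pvLast beats min_rr ((m:Int)+1+1) = (m:Int)+1 := by
        unfold pvLast
        rw [hcuts, show (0 :: (pvCuts beats min_rr ((m:Int)+1) ++ [(m:Int)+1]))
              = (0 :: pvCuts beats min_rr ((m:Int)+1)) ++ [(m:Int)+1] from rfl,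
            List.getLast?_concat]
        rfl
      have hseg : pvSegs (0 :: pvCuts beats min_rr ((m:Int)+1+1))
          = pvSegs (0 :: pvCuts beats min_rr ((m:Int)+1))
            ++ [(pvLast beats min_rr ((m:Int)+1), (m:Int)+1)] := by
        rw [hcuts, show (0 :: (pvCuts beats min_rr ((m:Int)+1) ++ [(m:Int)+1]))
              = (0 :: pvCuts beats min_rr ((m:Int)+1)) ++ [(m:Int)+1] from rfl]
        rw [pvSegs_append_singleton _ _ (by simp), pvLast_eq_getLast]
      rw [hseg, hlast]
      rw [slice_len_int beats _ _ hlb.1 (le_of_lt hlb.2) (by omega)]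
      rw [show ([] : List Int) ++ [PySem.List.pyGetD beats ((m:Int)+1) 0]
            = [PySem.List.pyGetD beats ((m:Int)+1) 0] from rfl]
      rw [show ([] : List Int) ++ [PySem.List.pyGetD symbols ((m:Int)+1) 0]
            = [PySem.List.pyGetD symbols ((m:Int)+1) 0] from rfl]
      rw [show ([] : List Int) ++ [PySem.List.pyGetD amps ((m:Int)+1) 0]
            = [PySem.List.pyGetD amps ((m:Int)+1) 0] from rfl]
      rw [← slice_singleton beats ((m:Int)+1) (by omega) (by omega),
          ← slice_singleton symbols ((m:Int)+1) (by omega) (by omega),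
          ← slice_singleton amps ((m:Int)+1) (by omega) (by omega)]
      simp
    · rw [if_neg hC]
      have hcuts := pvCuts_succ beats min_rr ((m:Int)+1) hk1
      rw [if_neg hC, List.append_nil] at hcuts
      have hlast : pvLast beats min_rr ((m:Int)+1+1) = pvLast beats min_rr ((m:Int)+1) := by
        unfold pvLast
        rw [hcuts]
      rw [hcuts, hlast]
      rw [slice_snoc beats _ _ hlb.1 (le_of_lt hlb.2) (by omega),
          slice_snoc symbols _ _ hlb.1 (le_of_lt hlb.2) (by omega),
          slice_snoc amps _ _ hlb.1 (le_of_lt hlb.2) (by omega)]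

-- ===== VERDICT (by name: the statement is the Claim_ definition above) =====
lemma slice_length_int (xs : List Int) (s k : Int) (h0 : 0 ≤ s) (h1 : s ≤ k) (h2 : k ≤ (xs.length : Int)) :
    (((PySem.List.slice xs (some s) (some k)).length : Int)) = k - s := by
  have := slice_len_int xs s k h0 h1 h2
  rwa [PySem.List.len_eq] at this

theorem beat_cluster_spec : Claim_equal_beat_cluster := by
  intro beats symbols amps min_rr _hdom hpre
  obtain ⟨hs, ha⟩ := hpre
  unfold Spec_beat_cluster beat_cluster beat_cluster_alt
  simp only [PySem.List.len_eq]
  by_cases hn : beats.length = 0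
  · simp [hn]
  · have hpos : 0 < beats.length := Nat.pos_of_ne_zero hn
    rw [show ((beats.length : Int)) = ((beats.length - 1 : Nat) : Int) + 1 from by omega]
    rw [pv_inv beats symbols amps min_rr hs ha (beats.length - 1) (by omega)]
    have hk1 : (1:Int) ≤ ((beats.length - 1 : Nat) : Int) + 1 := by omega
    have hlb := pvLast_bounds beats min_rr (((beats.length - 1 : Nat) : Int) + 1) hk1
    have hlen := slice_length_int beats _ _ hlb.1 (le_of_lt hlb.2)
      (show (((beats.length - 1 : Nat) : Int) + 1) ≤ (beats.length : Int) from by omega)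
    have hfull : pvSegs ((0 :: pvCuts beats min_rr (((beats.length - 1 : Nat) : Int) + 1)) ++ [((beats.length - 1 : Nat) : Int) + 1])
          = pvSegs (0 :: pvCuts beats min_rr (((beats.length - 1 : Nat) : Int) + 1))
            ++ [(pvLast beats min_rr (((beats.length - 1 : Nat) : Int) + 1), ((beats.length - 1 : Nat) : Int) + 1)] := by
      rw [pvSegs_append_singleton _ _ (by simp), pvLast_eq_getLast]
    rw [if_pos (show (0:Int) < ((beats.length - 1 : Nat) : Int) + 1 from by omega)]
    rw [if_neg (show ¬ (((beats.length - 1 : Nat) : Int) + 1 = 0) from by omega)]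
    simp only [List.cons_append] at hfull
    simp [hfull, hlen]
    omega
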